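-- pv_equiv track=rewrite | github.com/DanielQH07/tranSTR_Casual | networks/som_injection.py | _is_synonym
-- ===== SOURCE A (Python) =====
-- def _is_synonym(word1: str, word2: str) -> bool:
--     """Check if two words are synonyms."""
--     synonyms = {
--         'person': ['man', 'woman', 'people', 'human', 'guy', 'lady'],
--         'car': ['vehicle', 'automobile'],
--         'kid': ['child', 'boy', 'girl', 'children'],
--     }
--
--     for key, syns in synonyms.items():
--         all_words = [key] + syns
--         if word1 in all_words and word2 in all_words:
--             return True
--
--     return False
-- ===== SOURCE B (Python) =====
-- _SYNONYMS = {
--     'person': ['man', 'woman', 'people', 'human', 'guy', 'lady'],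
--     'car': ['vehicle', 'automobile'],
--     'kid': ['child', 'boy', 'girl', 'children'],
-- }
-- # reverse index: each word (key or synonym) -> its group key; groups are disjoint
-- _INDEX = {w: key for key, syns in _SYNONYMS.items() for w in [key] + syns}
--
--
-- def _is_synonym(word1: str, word2: str) -> bool:
--     """Check if two words are synonyms."""
--     g1 = _INDEX.get(word1)
--     return g1 is not None and g1 == _INDEX.get(word2)
-- ===== Notes on version B (the rewrite author's own statement) =====
-- stated objective: idiomatic
-- what changed: Replaces the per-group loop with double membership tests by a precomputed reverse index dict (word -> group key) and two direct lookups compared for equality.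
import Mathlib
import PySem

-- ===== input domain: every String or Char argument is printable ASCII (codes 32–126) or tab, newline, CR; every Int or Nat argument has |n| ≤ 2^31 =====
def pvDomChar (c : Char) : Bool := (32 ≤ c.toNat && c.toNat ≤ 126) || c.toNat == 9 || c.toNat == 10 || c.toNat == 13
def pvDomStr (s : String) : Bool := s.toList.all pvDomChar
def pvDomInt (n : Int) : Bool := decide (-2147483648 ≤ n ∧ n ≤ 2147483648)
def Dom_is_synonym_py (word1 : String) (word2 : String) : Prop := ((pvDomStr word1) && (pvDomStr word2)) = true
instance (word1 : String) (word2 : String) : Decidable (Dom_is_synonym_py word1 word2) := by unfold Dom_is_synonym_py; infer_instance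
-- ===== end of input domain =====

-- B replaces A's per-group loop (double membership test per group) by a precomputed
-- reverse index dict word -> group key and two direct lookups (idiomatic; no speed claim).

-- ===== PORT A =====
def synGroups : List (String × List String) :=
  [("person", ["man", "woman", "people", "human", "guy", "lady"]),
   ("car", ["vehicle", "automobile"]),
   ("kid", ["child", "boy", "girl", "children"])]

def isSynLoop (word1 word2 : String) : List (String × List String) → Bool
  | [] => false
  | (key, syns) :: rest =>
    let all_words := [key] ++ syns
    if all_words.contains word1 && all_words.contains word2 then true
    else isSynLoop word1 word2 rest

def is_synonym_py (word1 : String) (word2 : String) : Bool :=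
  isSynLoop word1 word2 synGroups

-- ===== PORT B =====
-- the dict comprehension {w: key for key, syns in _SYNONYMS.items() for w in [key] + syns},
-- the _SYNONYMS dict literal written inline
def synIndex : PySem.Dict String String :=
  [("person", ["man", "woman", "people", "human", "guy", "lady"]),
   ("car", ["vehicle", "automobile"]),
   ("kid", ["child", "boy", "girl", "children"])].foldl (fun d kv => (([kv.1] ++ kv.2).foldl (fun d w => d.insert w kv.1) d)) PySem.Dict.empty

def is_synonym_py_alt (word1 : String) (word2 : String) : Bool :=
  match synIndex.get? word1 with
  | none => false
  | some g1 => synIndex.get? word2 == some g1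

-- ===== PRECONDITION & SPEC =====
def Spec_is_synonym_py (word1 : String) (word2 : String) (out : Bool) : Prop := out = is_synonym_py_alt word1 word2
instance (word1 : String) (word2 : String) (out : Bool) : Decidable (Spec_is_synonym_py word1 word2 out) := by unfold Spec_is_synonym_py; infer_instance

-- ===== CLAIM (what is proved, stated in full; the proofs are below) =====
def Claim_equal_is_synonym_py : Prop := ∀ (word1 : String) (word2 : String), Dom_is_synonym_py word1 word2 → Spec_is_synonym_py word1 word2 (is_synonym_py word1 word2)

-- ===== LEMMAS AND PROOFS =====

-- the three synonym groups, key included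
def g1 : List String := ["person","man","woman","people","human","guy","lady"]
def g2 : List String := ["car","vehicle","automobile"]
def g3 : List String := ["kid","child","boy","girl","children"]

lemma cmem {w : String} {l : List String} (h : w ∈ l) : l.contains w = true :=
  List.elem_eq_true_of_mem h

lemma cnot {w : String} {l : List String} (h : w ∉ l) : l.contains w = false := by
  cases hc : l.contains w
  · rfl
  · exact absurd (List.mem_of_elem_eq_true hc) h

-- A's loop, characterised by the three group-membership tests
lemma loop_eq (w1 w2 : String) : is_synonym_py w1 w2 =
    ((g1.contains w1 && g1.contains w2) ||
      ((g2.contains w1 && g2.contains w2) || (g3.contains w1 && g3.contains w2))) := by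
  simp only [is_synonym_py, isSynLoop, synGroups, List.cons_append, List.nil_append, g1, g2, g3]
  cases h1 : (["person","man","woman","people","human","guy","lady"].contains w1 && ["person","man","woman","people","human","guy","lady"].contains w2) <;>
  cases h2 : (["car","vehicle","automobile"].contains w1 && ["car","vehicle","automobile"].contains w2) <;>
  cases h3 : (["kid","child","boy","girl","children"].contains w1 && ["kid","child","boy","girl","children"].contains w2) <;>
  simp_all

-- B's index, peeled into a lookup chain (innermost insert checked last)
lemma peel (w : String) : synIndex.get? w =
    (if w = "children" then some "kid" else if w = "girl" then some "kid" else if w = "boy" then some "kid"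
     else if w = "child" then some "kid" else if w = "kid" then some "kid"
     else if w = "automobile" then some "car" else if w = "vehicle" then some "car" else if w = "car" then some "car"
     else if w = "lady" then some "person" else if w = "guy" then some "person" else if w = "human" then some "person"
     else if w = "people" then some "person" else if w = "woman" then some "person" else if w = "man" then some "person"
     else if w = "person" then some "person" else none) := by
  simp only [synIndex, List.foldl_cons, List.foldl_nil, List.cons_append, List.nil_append,
    PySem.Dict.get?_insert, PySem.Dict.get?_empty]

lemma lookup_g1 {w : String} (h : w ∈ g1) : synIndex.get? w = some "person" := by
  rw [peel]; fin_cases h <;> simp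

lemma lookup_g2 {w : String} (h : w ∈ g2) : synIndex.get? w = some "car" := by
  rw [peel]; fin_cases h <;> simp

lemma lookup_g3 {w : String} (h : w ∈ g3) : synIndex.get? w = some "kid" := by
  rw [peel]; fin_cases h <;> simp

lemma lookup_none {w : String} (h1 : w ∉ g1) (h2 : w ∉ g2) (h3 : w ∉ g3) : synIndex.get? w = none := by
  simp [g1] at h1; simp [g2] at h2; simp [g3] at h3
  rw [peel]; simp [h1.1, h1.2.1, h1.2.2.1, h1.2.2.2.1, h1.2.2.2.2.1, h1.2.2.2.2.2.1, h1.2.2.2.2.2.2,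
    h2.1, h2.2.1, h2.2.2, h3.1, h3.2.1, h3.2.2.1, h3.2.2.2.1, h3.2.2.2.2]

-- the groups are pairwise disjoint
lemma d12 {w : String} (h : w ∈ g1) : w ∉ g2 := by fin_cases h <;> simp [g2]
lemma d13 {w : String} (h : w ∈ g1) : w ∉ g3 := by fin_cases h <;> simp [g3]
lemma d21 {w : String} (h : w ∈ g2) : w ∉ g1 := by fin_cases h <;> simp [g1]
lemma d23 {w : String} (h : w ∈ g2) : w ∉ g3 := by fin_cases h <;> simp [g3]
lemma d31 {w : String} (h : w ∈ g3) : w ∉ g1 := by fin_cases h <;> simp [g1]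
lemma d32 {w : String} (h : w ∈ g3) : w ∉ g2 := by fin_cases h <;> simp [g2]

-- ===== VERDICT (by name: the statement is the Claim_ definition above) =====
theorem is_synonym_py_spec : Claim_equal_is_synonym_py := by
  intro w1 w2 _
  unfold Spec_is_synonym_py
  rw [loop_eq]
  by_cases m1 : w1 ∈ g1
  · have n2 := d12 m1; have n3 := d13 m1
    by_cases k1 : w2 ∈ g1
    · simp only [is_synonym_py_alt, Bool.true_and, Bool.false_and, Bool.and_false, Bool.true_or, Bool.false_or, Bool.or_false, lookup_g1 m1, lookup_g1 k1, cmem m1, cmem k1, cnot n2, cnot n3]; decide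
    · by_cases k2 : w2 ∈ g2
      · simp only [is_synonym_py_alt, Bool.true_and, Bool.false_and, Bool.and_false, Bool.true_or, Bool.false_or, Bool.or_false, lookup_g1 m1, lookup_g2 k2, cmem m1, cnot k1, cnot n2, cnot n3]; decide
      · by_cases k3 : w2 ∈ g3
        · simp only [is_synonym_py_alt, Bool.true_and, Bool.false_and, Bool.and_false, Bool.true_or, Bool.false_or, Bool.or_false, lookup_g1 m1, lookup_g3 k3, cmem m1, cnot k1, cnot n2, cnot n3]; decide
        · simp only [is_synonym_py_alt, Bool.true_and, Bool.false_and, Bool.and_false, Bool.true_or, Bool.false_or, Bool.or_false, lookup_g1 m1, lookup_none k1 k2 k3, cmem m1, cnot k1, cnot n2, cnot n3]; decide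
  · by_cases m2 : w1 ∈ g2
    · have n1 := d21 m2; have n3 := d23 m2
      by_cases k2 : w2 ∈ g2
      · simp only [is_synonym_py_alt, Bool.true_and, Bool.false_and, Bool.and_false, Bool.true_or, Bool.false_or, Bool.or_false, lookup_g2 m2, lookup_g2 k2, cmem m2, cmem k2, cnot n1, cnot n3]; decide
      · by_cases k1 : w2 ∈ g1
        · simp only [is_synonym_py_alt, Bool.true_and, Bool.false_and, Bool.and_false, Bool.true_or, Bool.false_or, Bool.or_false, lookup_g2 m2, lookup_g1 k1, cmem m2, cnot k2, cnot n1, cnot n3]; decide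
        · by_cases k3 : w2 ∈ g3
          · simp only [is_synonym_py_alt, Bool.true_and, Bool.false_and, Bool.and_false, Bool.true_or, Bool.false_or, Bool.or_false, lookup_g2 m2, lookup_g3 k3, cmem m2, cnot k2, cnot n1, cnot n3]; decide
          · simp only [is_synonym_py_alt, Bool.true_and, Bool.false_and, Bool.and_false, Bool.true_or, Bool.false_or, Bool.or_false, lookup_g2 m2, lookup_none k1 k2 k3, cmem m2, cnot k2, cnot n1, cnot n3]; decide
    · by_cases m3 : w1 ∈ g3
      · have n1 := d31 m3; have n2 := d32 m3
        by_cases k3 : w2 ∈ g3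
        · simp only [is_synonym_py_alt, Bool.true_and, Bool.false_and, Bool.and_false, Bool.true_or, Bool.false_or, Bool.or_false, lookup_g3 m3, lookup_g3 k3, cmem m3, cmem k3, cnot n1, cnot n2]; decide
        · by_cases k1 : w2 ∈ g1
          · simp only [is_synonym_py_alt, Bool.true_and, Bool.false_and, Bool.and_false, Bool.true_or, Bool.false_or, Bool.or_false, lookup_g3 m3, lookup_g1 k1, cmem m3, cnot k3, cnot n1, cnot n2]; decide
          · by_cases k2 : w2 ∈ g2
            · simp only [is_synonym_py_alt, Bool.true_and, Bool.false_and, Bool.and_false, Bool.true_or, Bool.false_or, Bool.or_false, lookup_g3 m3, lookup_g2 k2, cmem m3, cnot k3, cnot n1, cnot n2]; decide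
            · simp only [is_synonym_py_alt, Bool.true_and, Bool.false_and, Bool.and_false, Bool.true_or, Bool.false_or, Bool.or_false, lookup_g3 m3, lookup_none k1 k2 k3, cmem m3, cnot k3, cnot n1, cnot n2]; decide
      · simp only [is_synonym_py_alt, Bool.true_and, Bool.false_and, Bool.and_false, Bool.true_or, Bool.false_or, Bool.or_false, lookup_none m1 m2 m3, cnot m1, cnot m2, cnot m3]
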